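-- pv_equiv track=rewrite | github.com/frantallukas10/python-fundamentals | 6_Funkcie/6.43_Filter2.py | moj_filter
-- ===== SOURCE A (Python) =====
-- def moj_filter(cisla: list) -> tuple:
--     mini = cisla[0]
--     maxi  = cisla[0]
--     zvysok = []
--     for cislo in range(0, len(cisla)):
--         if (cisla[cislo] > maxi):
--             maxi = cisla[cislo]
--         if (cisla[cislo] < mini):
--             mini = cisla[cislo]
--     for cislo in range(0, len(cisla)):
--         if (cisla[cislo] != maxi and cisla[cislo] != mini):
--             zvysok.append(cisla[cislo])
--     return (mini, maxi, zvysok)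
-- ===== SOURCE B (Python) =====
-- def moj_filter(cisla: list) -> tuple:
--     s = sorted(cisla)
--     mini = s[0]
--     maxi = s[-1]
--     zvysok = [x for x in cisla if x != mini and x != maxi]
--     return (mini, maxi, zvysok)
-- ===== Notes on version B (the rewrite author's own statement) =====
-- stated objective: simpler
-- what changed: B sorts a copy once and reads the extremes from the ends of the sorted list instead of A's manual index-loop min/max scan; the remainder is a comprehension over the original list instead of an index loop with append.
import Mathlib
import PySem

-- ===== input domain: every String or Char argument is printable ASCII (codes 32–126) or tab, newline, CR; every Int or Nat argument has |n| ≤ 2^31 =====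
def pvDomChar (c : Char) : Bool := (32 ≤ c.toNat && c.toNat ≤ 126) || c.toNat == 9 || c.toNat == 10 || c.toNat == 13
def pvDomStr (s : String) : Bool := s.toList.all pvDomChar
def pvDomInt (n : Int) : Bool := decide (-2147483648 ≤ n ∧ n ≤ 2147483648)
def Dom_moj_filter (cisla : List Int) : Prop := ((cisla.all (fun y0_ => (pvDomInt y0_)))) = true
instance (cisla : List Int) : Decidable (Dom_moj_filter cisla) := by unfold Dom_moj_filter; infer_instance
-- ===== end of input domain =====

-- B sorts a copy once and reads the extremes from the ends of the sorted list, then filters the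
-- original list; simpler than A's manual index-loop min/max scan. Return value only; no mutation.

-- ===== PORT A =====
-- A: manual min/max scan over indices, then an index loop appending the middle elements.
def moj_filter (cisla : List Int) : Int × Int × List Int :=
  let first := PySem.List.pyGetD cisla 0 0   -- cisla[0]; Pre_ excludes the empty list where Python raises IndexError
  let mm := (PySem.List.pyRange 0 (PySem.List.len cisla) 1).foldl
    (fun (s : Int × Int) i =>
      let x := PySem.List.pyGetD cisla i 0
      let maxi := if x > s.2 then x else s.2
      let mini := if x < s.1 then x else s.1
      (mini, maxi)) (first, first)
  let zvysok := (PySem.List.pyRange 0 (PySem.List.len cisla) 1).foldl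
    (fun (acc : List Int) i =>
      let x := PySem.List.pyGetD cisla i 0
      if x ≠ mm.2 ∧ x ≠ mm.1 then acc ++ [x] else acc) []
  (mm.1, mm.2, zvysok)

-- ===== PORT B =====
def moj_filter_alt (cisla : List Int) : Int × Int × List Int :=
  let s := PySem.List.sorted cisla (fun x => x) false
  let mini := PySem.List.pyGetD s 0 0        -- s[0]; Pre_ excludes the empty list where Python raises IndexError
  let maxi := PySem.List.pyGetD s (-1) 0     -- s[-1]
  (mini, maxi, cisla.filter (fun x => x ≠ mini ∧ x ≠ maxi))

-- ===== PRECONDITION & SPEC =====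
-- Pre_ excludes only the empty list, where both A (cisla[0]) and B (s[0]) raise IndexError.
def Pre_moj_filter (cisla : List Int) : Prop := cisla ≠ []
instance (cisla : List Int) : Decidable (Pre_moj_filter cisla) := by unfold Pre_moj_filter; infer_instance
def pvWitness_moj_filter : List Int := [3, 1, 2, 1, 3]

def Spec_moj_filter (cisla : List Int) (out : Int × Int × List Int) : Prop := out = moj_filter_alt cisla
instance (cisla : List Int) (out : Int × Int × List Int) : Decidable (Spec_moj_filter cisla out) := by unfold Spec_moj_filter; infer_instance

-- ===== CLAIM (what is proved, stated in full; the proofs are below) =====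
def Claim_equal_moj_filter : Prop := ∀ (cisla : List Int), Dom_moj_filter cisla → Pre_moj_filter cisla → Spec_moj_filter cisla (moj_filter cisla)

-- ===== LEMMAS AND PROOFS =====

-- A's min-fold: the result is a member of c :: xs and a lower bound of it.
theorem foldl_min_mem (xs : List Int) (c : Int) :
    xs.foldl (fun m x => if x < m then x else m) c ∈ c :: xs := by
  induction xs generalizing c with
  | nil => simp
  | cons y ys ih =>
    simp only [List.foldl_cons]
    have h := ih (if y < c then y else c)
    rw [List.mem_cons] at h
    rcases h with h | h
    · rw [h]; split_ifs <;> simp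
    · simp [h]

theorem foldl_min_le (xs : List Int) (c : Int) :
    ∀ y ∈ c :: xs, xs.foldl (fun m x => if x < m then x else m) c ≤ y := by
  induction xs generalizing c with
  | nil => simp
  | cons z zs ih =>
    intro y hy
    simp only [List.foldl_cons]
    have hle : (if z < c then z else c) ≤ c ∧ (if z < c then z else c) ≤ z := by
      split_ifs with h <;> omega
    rw [List.mem_cons, List.mem_cons] at hy
    rcases hy with rfl | rfl | hmem
    · exact le_trans (ih _ _ (List.mem_cons_self ..)) hle.1
    · exact le_trans (ih _ _ (List.mem_cons_self ..)) hle.2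
    · exact ih _ _ (List.mem_cons_of_mem _ hmem)

theorem foldl_max_mem (xs : List Int) (c : Int) :
    xs.foldl (fun m x => if x > m then x else m) c ∈ c :: xs := by
  induction xs generalizing c with
  | nil => simp
  | cons y ys ih =>
    simp only [List.foldl_cons]
    have h := ih (if y > c then y else c)
    rw [List.mem_cons] at h
    rcases h with h | h
    · rw [h]; split_ifs <;> simp
    · simp [h]

theorem foldl_max_ge (xs : List Int) (c : Int) :
    ∀ y ∈ c :: xs, y ≤ xs.foldl (fun m x => if x > m then x else m) c := by
  induction xs generalizing c with
  | nil => simp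
  | cons z zs ih =>
    intro y hy
    simp only [List.foldl_cons]
    have hle : c ≤ (if z > c then z else c) ∧ z ≤ (if z > c then z else c) := by
      split_ifs with h <;> omega
    rw [List.mem_cons, List.mem_cons] at hy
    rcases hy with rfl | rfl | hmem
    · exact le_trans hle.1 (ih _ _ (List.mem_cons_self ..))
    · exact le_trans hle.2 (ih _ _ (List.mem_cons_self ..))
    · exact ih _ _ (List.mem_cons_of_mem _ hmem)

-- The last element of a (≤)-sorted list is an upper bound of its members.
theorem pairwise_le_getLast (l : List Int) (hl : l.Pairwise (· ≤ ·)) (h : l ≠ []) :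
    ∀ y ∈ l, y ≤ l.getLast h := by
  induction l with
  | nil => simp at h
  | cons a t ih =>
    intro y hy
    cases t with
    | nil => rw [List.mem_singleton] at hy; simp [hy]
    | cons b u =>
      rw [List.getLast_cons (by simp)]
      rw [List.mem_cons] at hy
      rcases hy with rfl | hy
      · exact (List.pairwise_cons.mp hl).1 _ (List.getLast_mem _)
      · exact ih (List.pairwise_cons.mp hl).2 (by simp) y hy

theorem pyGetD_neg_one_getLast (l : List Int) (h : l ≠ []) :
    PySem.List.pyGetD l (-1) 0 = l.getLast h := by
  have hl : 1 ≤ l.length := by cases l with | nil => simp at h | cons a b => simp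
  simp only [PySem.List.pyGetD, PySem.List.pyGet?, PySem.List.pyIdx?, Int.reduceNeg,
    Int.neg_nonneg, Int.reduceLE, ↓reduceIte, neg_le_neg_iff, Nat.one_le_cast, neg_neg,
    Int.toNat_one]
  rw [if_pos (by exact_mod_cast hl)]
  simp [List.getElem?_eq_getElem (by omega : l.length - 1 < l.length), List.getLast_eq_getElem]

theorem mojA_char (c : Int) (t : List Int) :
    moj_filter (c :: t) = ((c::t).foldl (fun m x => if x < m then x else m) c,
      (c::t).foldl (fun m x => if x > m then x else m) c,
      (c::t).filter (fun x =>
        x ≠ (c::t).foldl (fun m x => if x > m then x else m) c ∧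
        x ≠ (c::t).foldl (fun m x => if x < m then x else m) c)) := by
  unfold moj_filter
  simp only [show PySem.List.pyGetD (c :: t) 0 0 = c by simp [pysem]]
  rw [PySem.List.foldl_pyRange_zero_pyGetD (c :: t) 0
        (f := fun (s : Int × Int) x =>
          (if x < s.1 then x else s.1, if x > s.2 then x else s.2)) (c, c),
      PySem.List.foldl_prod_mk (f := fun m x => if x < m then x else m)
        (g := fun m x => if x > m then x else m)]
  rw [PySem.List.foldl_pyRange_zero_pyGetD (c :: t) 0
        (f := fun (acc : List Int) x =>
          if x ≠ (c::t).foldl (fun m x => if x > m then x else m) c ∧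
             x ≠ (c::t).foldl (fun m x => if x < m then x else m) c
           then acc ++ [x] else acc) []]
  rw [PySem.List.foldl_append_ite_eq_filter]
  simp

theorem moj_filter_spec_cons (c : Int) (t : List Int) :
    moj_filter (c :: t) = moj_filter_alt (c :: t) := by
  obtain ⟨m, t', hs⟩ : ∃ m t', PySem.List.sorted (c :: t) (fun x => x) false = m :: t' := by
    cases h : PySem.List.sorted (c :: t) (fun x => x) false with
    | nil => exact absurd ((PySem.List.sorted_eq_nil_iff ..).mp h) (by simp)
    | cons m t' => exact ⟨m, t', rfl⟩
  have hsne : PySem.List.sorted (c :: t) (fun x => x) false ≠ [] := by rw [hs]; simp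
  -- B's extremes
  have hhead : PySem.List.pyGetD (PySem.List.sorted (c :: t) (fun x => x) false) 0 0 = m := by
    rw [hs]; simp [pysem]
  have hlastmem := List.getLast_mem hsne
  have hlast := pyGetD_neg_one_getLast _ hsne
  -- m is the minimum of c :: t
  have hmin : (c::t).foldl (fun mi x => if x < mi then x else mi) c = m := by
    apply le_antisymm
    · exact foldl_min_le (c :: t) c m (List.mem_cons_of_mem _
        ((PySem.List.mem_sorted (c :: t) (fun x => x) false m).mp (hs ▸ List.mem_cons_self ..)))
    · have hub := PySem.List.key_head_sorted_le (c :: t) (fun x => x) hs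
      have hmem := foldl_min_mem (c :: t) c
      rw [List.mem_cons] at hmem
      rcases hmem with h | h
      · rw [h]; exact hub c (List.mem_cons_self ..)
      · exact hub _ h
  -- the last of sorted is the maximum of c :: t
  have hmax : (c::t).foldl (fun ma x => if x > ma then x else ma) c
      = (PySem.List.sorted (c :: t) (fun x => x) false).getLast hsne := by
    apply le_antisymm
    · have hub := pairwise_le_getLast _ (PySem.List.sorted_pairwise (c :: t) (fun x => x)) hsne
      have hmem := foldl_max_mem (c :: t) c
      rw [List.mem_cons] at hmem
      rcases hmem with h | h
      · rw [h]
        exact hub _ ((PySem.List.mem_sorted (c :: t) (fun x => x) false c).mpr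
          (List.mem_cons_self ..))
      · exact hub _ ((PySem.List.mem_sorted (c :: t) (fun x => x) false _).mpr h)
    · exact foldl_max_ge (c :: t) c _ (List.mem_cons_of_mem _
        ((PySem.List.mem_sorted (c :: t) (fun x => x) false _).mp hlastmem))
  rw [mojA_char]
  unfold moj_filter_alt
  simp only [hhead, hlast, hmin, hmax]
  simp only [Prod.mk.injEq]
  refine ⟨trivial, trivial, List.filter_congr ?_⟩
  intro x _
  simp only [decide_eq_decide]
  tauto

-- ===== VERDICT (by name: the statement is the Claim_ definition above) =====
theorem moj_filter_spec : Claim_equal_moj_filter := by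
  intro cisla _ hpre
  unfold Spec_moj_filter
  cases cisla with
  | nil => exact absurd rfl hpre
  | cons c t => exact moj_filter_spec_cons c t
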